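-- pv_equiv track=rewrite | github.com/readline/btb | sortMatrix.py | splitContinuousList
-- ===== SOURCE A (Python) =====
-- def splitContinuousList(tmplist):
--     l = []
--     tmp = []
--     for n in range(len(tmplist)-1):
--         tmp.append(tmplist[n])
--         if tmplist[n][1] != tmplist[n+1][1]:
--             l.append(tmp)
--             tmp = []
--     tmp.append(tmplist[len(tmplist)-1])
--     l.append(tmp)
--     return l
-- ===== SOURCE B (Python) =====
-- def splitContinuousList(tmplist):
--     n = len(tmplist)
--     bounds = [0] + [i + 1 for i in range(n - 1) if tmplist[i][1] != tmplist[i + 1][1]] + [n]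
--     return [tmplist[a:b] for a, b in zip(bounds, bounds[1:])]
-- ===== Notes on version B (the rewrite author's own statement) =====
-- stated objective: alternative
-- what changed: B replaces A's element-by-element accumulation with mutable (l, tmp) state by computing the boundary-index table first and then slicing the list between adjacent bounds.
-- outside the precondition, e.g. on splitContinuousList([]): A raises IndexError, B returns [[]]
import Mathlib
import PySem

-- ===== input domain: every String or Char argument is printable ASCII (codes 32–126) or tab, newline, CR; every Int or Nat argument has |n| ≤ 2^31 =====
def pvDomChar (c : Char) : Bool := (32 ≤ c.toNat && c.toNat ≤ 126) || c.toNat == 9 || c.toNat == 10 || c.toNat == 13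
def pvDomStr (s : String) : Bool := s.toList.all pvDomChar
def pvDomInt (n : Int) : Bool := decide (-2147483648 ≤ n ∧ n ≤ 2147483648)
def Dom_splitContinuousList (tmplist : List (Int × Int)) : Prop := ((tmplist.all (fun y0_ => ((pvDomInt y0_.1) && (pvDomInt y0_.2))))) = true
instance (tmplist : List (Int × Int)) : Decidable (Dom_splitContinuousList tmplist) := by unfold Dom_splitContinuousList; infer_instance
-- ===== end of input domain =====

-- B replaces A's element-by-element accumulation with a boundary-index table followed by slicing (alternative decomposition, same cost).

-- ===== PORT A =====
-- transliteration of A: state (l, tmp), loop over range(len-1), final append of last element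
def splitContinuousList (tmplist : List (Int × Int)) : List (List (Int × Int)) :=
  let st := (PySem.List.pyRange 0 ((tmplist.length : Int) - 1) 1).foldl
    (fun (st : List (List (Int × Int)) × List (Int × Int)) n =>
      let tmp := st.2 ++ [PySem.List.pyGetD tmplist n (0, 0)]
      if (PySem.List.pyGetD tmplist n (0, 0)).2 ≠ (PySem.List.pyGetD tmplist (n + 1) (0, 0)).2
      then (st.1 ++ [tmp], [])
      else (st.1, tmp))
    ([], [])
  st.1 ++ [st.2 ++ [PySem.List.pyGetD tmplist ((tmplist.length : Int) - 1) (0, 0)]]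

-- ===== PORT B =====
-- transliteration of B: bounds = [0] + boundary positions + [n]; slice between adjacent bounds
def splitContinuousList_alt (tmplist : List (Int × Int)) : List (List (Int × Int)) :=
  let n : Int := tmplist.length
  let bounds : List Int :=
    [0] ++ (((PySem.List.pyRange 0 (n - 1) 1).filter
        (fun i => (PySem.List.pyGetD tmplist i (0, 0)).2 ≠ (PySem.List.pyGetD tmplist (i + 1) (0, 0)).2)).map
        (fun i => i + 1)) ++ [n]
  (bounds.zip bounds.tail).map (fun p => PySem.List.slice tmplist (some p.1) (some p.2))

-- ===== PRECONDITION & SPEC =====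
-- Pre_ excludes only the empty list, on which A raises IndexError (tmplist[len(tmplist)-1]).
def Pre_splitContinuousList (tmplist : List (Int × Int)) : Prop := tmplist ≠ []
instance (tmplist : List (Int × Int)) : Decidable (Pre_splitContinuousList tmplist) := by unfold Pre_splitContinuousList; infer_instance
def pvWitness_splitContinuousList : (List (Int × Int)) := [(1, 2), (3, 2), (4, 5)]

def Spec_splitContinuousList (tmplist : List (Int × Int)) (out : List (List (Int × Int))) : Prop := out = splitContinuousList_alt tmplist
instance (tmplist : List (Int × Int)) (out : List (List (Int × Int))) : Decidable (Spec_splitContinuousList tmplist out) := by unfold Spec_splitContinuousList; infer_instance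

-- ===== CLAIM (what is proved, stated in full; the proofs are below) =====
def Claim_equal_splitContinuousList : Prop := ∀ (tmplist : List (Int × Int)), Dom_splitContinuousList tmplist → Pre_splitContinuousList tmplist → Spec_splitContinuousList tmplist (splitContinuousList tmplist)

-- ===== LEMMAS AND PROOFS =====

-- canonical recursive grouping: (first group, remaining groups)
def split1 : (Int × Int) → List (Int × Int) → (List (Int × Int) × List (List (Int × Int)))
  | x, [] => ([x], [])
  | x, y :: ys =>
    let r := split1 y ys
    if x.2 ≠ y.2 then ([x], r.1 :: r.2) else (x :: r.1, r.2)

-- A's loop as a structural fold over adjacent pairs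
def adjFold {σ : Type} (f : σ → (Int × Int) → (Int × Int) → σ) : (Int × Int) → List (Int × Int) → σ → σ
  | _, [], init => init
  | x, y :: ys, init => adjFold f y ys (f init x y)

def stepA (st : List (List (Int × Int)) × List (Int × Int)) (a b : Int × Int) :
    List (List (Int × Int)) × List (Int × Int) :=
  if a.2 ≠ b.2 then (st.1 ++ [st.2 ++ [a]], []) else (st.1, st.2 ++ [a])

lemma nat_adj {σ : Type} (f : σ → (Int × Int) → (Int × Int) → σ) (d : Int × Int) :
    ∀ (L : List (Int × Int)) (x : Int × Int) (init : σ),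
      (List.range L.length).foldl (fun st k => f st ((x :: L).getD k d) ((x :: L).getD (k + 1) d)) init
        = adjFold f x L init := by
  intro L
  induction L with
  | nil => intro x init; simp [adjFold]
  | cons y ys ih =>
    intro x init
    rw [show (y :: ys).length = ys.length + 1 from rfl, List.range_succ_eq_map]
    simp only [List.foldl_cons, List.foldl_map, List.getD_cons_zero, List.getD_cons_succ]
    exact ih y (f init x y)

lemma A_fold (x : Int × Int) (xs : List (Int × Int)) :
    splitContinuousList (x :: xs)
      = (let st := adjFold stepA x xs ([], []);
         st.1 ++ [st.2 ++ [(x :: xs).getD xs.length (0, 0)]]) := by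
  unfold splitContinuousList
  simp only [List.length_cons]
  rw [show ((xs.length + 1 : Nat) : Int) - 1 = ((xs.length : Nat) : Int) by push_cast; ring]
  rw [PySem.List.pyRange_zero_nat, List.foldl_map]
  simp only [show ∀ k : Nat, ((k : Int) + 1) = (((k + 1 : Nat)) : Int) from fun k => by push_cast; ring,
    PySem.List.pyGetD_natCast]
  exact congrArg (fun st : List (List (Int × Int)) × List (Int × Int) =>
      st.1 ++ [st.2 ++ [(x :: xs).getD xs.length (0, 0)]])
    (nat_adj (fun st a b => if a.2 ≠ b.2 then (st.1 ++ [st.2 ++ [a]], []) else (st.1, st.2 ++ [a]))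
      (0, 0) xs x ([], []))

lemma adj_inv :
    ∀ (xs : List (Int × Int)) (x : Int × Int) (l : List (List (Int × Int))) (tmp : List (Int × Int)),
      (let st := adjFold stepA x xs (l, tmp);
       st.1 ++ [st.2 ++ [(x :: xs).getD xs.length (0, 0)]])
        = l ++ (tmp ++ (split1 x xs).1) :: (split1 x xs).2 := by
  intro xs
  induction xs with
  | nil => intro x l tmp; simp [adjFold, split1]
  | cons y ys ih =>
    intro x l tmp
    simp only [adjFold, List.length_cons, List.getD_cons_succ]
    by_cases h : x.2 = y.2
    · rw [show stepA (l, tmp) x y = (l, tmp ++ [x]) by simp [stepA, h]]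
      rw [ih]
      simp [split1, h]
    · rw [show stepA (l, tmp) x y = (l ++ [tmp ++ [x]], []) by simp [stepA, h]]
      rw [ih]
      simp [split1, h]

-- B's slicer over a Nat bounds list
def sliceSeq (L : List (Int × Int)) : List Nat → List (List (Int × Int))
  | a :: b :: rest => ((L.drop a).take (b - a)) :: sliceSeq L (b :: rest)
  | _ => []

def bndsN (x : Int × Int) (xs : List (Int × Int)) : List Nat :=
  0 :: (((List.range xs.length).filter
      (fun k => ((x :: xs).getD k (0, 0)).2 ≠ ((x :: xs).getD (k + 1) (0, 0)).2)).map
      (fun k => k + 1)) ++ [xs.length + 1]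

lemma zip_slice (L : List (Int × Int)) :
    ∀ (bs : List Nat),
      (((bs.map (fun k : Nat => (k : Int))).zip ((bs.map (fun k : Nat => (k : Int))).tail)).map
          (fun p => PySem.List.slice L (some p.1) (some p.2)))
        = sliceSeq L bs := by
  intro bs
  induction bs with
  | nil => rfl
  | cons a rest ih =>
    cases rest with
    | nil => rfl
    | cons b r =>
      refine congrArg₂ List.cons ?_ ih
      exact PySem.List.slice_natCast L a b

lemma bounds_cast (p : Nat → Bool) (m : Nat) :
    [(0 : Int)] ++ (List.map (fun i => i + 1) ((List.filter p (List.range m)).map (fun k : Nat => (k : Int)))) ++ [((m + 1 : Nat) : Int)]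
      = (0 :: (List.filter p (List.range m)).map (fun k => k + 1) ++ [m + 1]).map (fun k : Nat => (k : Int)) := by
  simp only [List.map_map, List.map_cons, List.map_append,
    List.cons_append, List.nil_append]
  push_cast
  simp [Function.comp_def]

lemma B_nat (x : Int × Int) (xs : List (Int × Int)) :
    splitContinuousList_alt (x :: xs) = sliceSeq (x :: xs) (bndsN x xs) := by
  simp only [splitContinuousList_alt, List.length_cons]
  rw [show ((xs.length + 1 : Nat) : Int) - 1 = ((xs.length : Nat) : Int) by push_cast; ring]
  rw [PySem.List.pyRange_zero_nat, List.filter_map]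
  rw [show (fun i => decide ((PySem.List.pyGetD (x :: xs) i (0, 0)).2 ≠ (PySem.List.pyGetD (x :: xs) (i + 1) (0, 0)).2)) ∘ (fun k : Nat => (k : Int))
      = fun k : Nat => decide (((x :: xs).getD k (0, 0)).2 ≠ ((x :: xs).getD (k + 1) (0, 0)).2) from by
    funext k
    simp only [Function.comp_apply,
      show ((k : Int) + 1) = (((k + 1 : Nat)) : Int) by push_cast; ring,
      PySem.List.pyGetD_natCast]]
  rw [bounds_cast, zip_slice]
  rfl

lemma sliceSeq_shift (t : List (Int × Int)) (x : Int × Int) :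
    ∀ (cs : List Nat), sliceSeq (x :: t) (cs.map (fun k => k + 1)) = sliceSeq t cs := by
  intro cs
  induction cs with
  | nil => rfl
  | cons a rest ih =>
    cases rest with
    | nil => rfl
    | cons b r =>
      refine congrArg₂ List.cons ?_ ih
      show ((x :: t).drop (a + 1)).take ((b + 1) - (a + 1)) = (t.drop a).take (b - a)
      rw [List.drop_succ_cons, Nat.add_sub_add_right]

lemma B_char : ∀ (xs : List (Int × Int)) (x : Int × Int),
    sliceSeq (x :: xs) (bndsN x xs) = (split1 x xs).1 :: (split1 x xs).2 := by
  intro xs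
  induction xs with
  | nil => intro x; rfl
  | cons y ys ih =>
    intro x
    have hsucc : Nat.succ = (fun k : Nat => k + 1) := funext fun k => rfl
    have hp : (fun k => decide (((x :: y :: ys).getD k (0, 0)).2 ≠ ((x :: y :: ys).getD (k + 1) (0, 0)).2)) ∘ Nat.succ
        = (fun k => decide (((y :: ys).getD k (0, 0)).2 ≠ ((y :: ys).getD (k + 1) (0, 0)).2)) := by
      funext k
      simp only [Function.comp_apply, Nat.succ_eq_add_one, List.getD_cons_succ]
    have hfilter : List.filter
        (fun k => decide (((x :: y :: ys).getD k (0, 0)).2 ≠ ((x :: y :: ys).getD (k + 1) (0, 0)).2))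
        (List.range (ys.length + 1))
        = (if x.2 ≠ y.2 then [0] else []) ++
          List.map (fun k => k + 1) (List.filter
            (fun k => decide (((y :: ys).getD k (0, 0)).2 ≠ ((y :: ys).getD (k + 1) (0, 0)).2))
            (List.range ys.length)) := by
      rw [List.range_succ_eq_map, List.filter_cons, List.filter_map, hp, hsucc]
      by_cases h : x.2 = y.2
      · rw [if_neg (by simp [h]), if_neg (by simpa using not_not_intro h)]
        simp
      · rw [if_pos (by simp [h]), if_pos (by simpa using h)]
        simp
    have hbx : bndsN x (y :: ys)
        = 0 :: List.map (fun k => k + 1) ((if x.2 ≠ y.2 then [0] else []) ++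
            List.map (fun k => k + 1) (List.filter
              (fun k => decide (((y :: ys).getD k (0, 0)).2 ≠ ((y :: ys).getD (k + 1) (0, 0)).2))
              (List.range ys.length))) ++ [ys.length + 1 + 1] := by
      simp only [bndsN, List.length_cons, hfilter]
    have hby : bndsN y ys
        = 0 :: (List.map (fun k => k + 1) (List.filter
            (fun k => decide (((y :: ys).getD k (0, 0)).2 ≠ ((y :: ys).getD (k + 1) (0, 0)).2))
            (List.range ys.length)) ++ [ys.length + 1]) := rfl
    by_cases h : x.2 = y.2
    · -- x joins the first group of the tail
      obtain ⟨b1, bs', hT⟩ : ∃ b1 bs',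
          List.map (fun k => k + 1) (List.filter
            (fun k => decide (((y :: ys).getD k (0, 0)).2 ≠ ((y :: ys).getD (k + 1) (0, 0)).2))
            (List.range ys.length)) ++ [ys.length + 1] = b1 :: bs' := by
        cases (List.map (fun k => k + 1) (List.filter
            (fun k => decide (((y :: ys).getD k (0, 0)).2 ≠ ((y :: ys).getD (k + 1) (0, 0)).2))
            (List.range ys.length))) with
        | nil => exact ⟨_, _, rfl⟩
        | cons c cs => exact ⟨_, _, rfl⟩
      have hbx' : bndsN x (y :: ys) = 0 :: List.map (fun k => k + 1) (b1 :: bs') := by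
        rw [hbx, if_neg (by simpa using not_not_intro h), ← hT]
        simp
      have hih := ih y
      rw [hby, hT] at hih
      have hstep0 : sliceSeq (y :: ys) (0 :: b1 :: bs')
          = ((y :: ys).take b1) :: sliceSeq (y :: ys) (b1 :: bs') := by
        simp [sliceSeq]
      rw [hstep0] at hih
      have hih1 : (y :: ys).take b1 = (split1 y ys).1 := by injection hih
      have hih2 : sliceSeq (y :: ys) (b1 :: bs') = (split1 y ys).2 := by injection hih
      rw [hbx', List.map_cons]
      have hstep : sliceSeq (x :: y :: ys) (0 :: (b1 + 1) :: List.map (fun k => k + 1) bs')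
          = ((x :: y :: ys).take (b1 + 1)) :: sliceSeq (x :: y :: ys) ((b1 + 1) :: List.map (fun k => k + 1) bs') := by
        simp [sliceSeq]
      rw [hstep]
      have hshift : sliceSeq (x :: y :: ys) ((b1 + 1) :: List.map (fun k => k + 1) bs')
          = sliceSeq (y :: ys) (b1 :: bs') := by
        simpa using sliceSeq_shift (y :: ys) x (b1 :: bs')
      rw [hshift, hih2]
      have htake : (x :: y :: ys).take (b1 + 1) = x :: (y :: ys).take b1 := rfl
      rw [htake, hih1]
      show (x :: (split1 y ys).1) :: (split1 y ys).2 = (split1 x (y :: ys)).1 :: (split1 x (y :: ys)).2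
      simp [split1, h]
    · -- boundary between x and y: x alone, then the tail's groups
      have hbx' : bndsN x (y :: ys) = 0 :: List.map (fun k => k + 1) (bndsN y ys) := by
        rw [hbx, if_pos (by simpa using h), hby]
        simp
      rw [hbx']
      have hstep : sliceSeq (x :: y :: ys) (0 :: List.map (fun k => k + 1) (bndsN y ys))
          = [x] :: sliceSeq (x :: y :: ys) (List.map (fun k => k + 1) (bndsN y ys)) := by
        rw [hby]
        simp [sliceSeq]
      rw [hstep, sliceSeq_shift, ih y]
      show [x] :: ((split1 y ys).1 :: (split1 y ys).2) = (split1 x (y :: ys)).1 :: (split1 x (y :: ys)).2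
      simp [split1, h]

-- ===== VERDICT (by name: the statement is the Claim_ definition above) =====
theorem splitContinuousList_spec : Claim_equal_splitContinuousList := by
  intro tmplist _ hpre
  unfold Spec_splitContinuousList
  cases tmplist with
  | nil => exact absurd rfl hpre
  | cons x xs =>
    rw [A_fold, adj_inv, B_nat, B_char]
    simp
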